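-- pv_equiv track=rewrite | github.com/EuiseokJeongNZ/LeetCode | Hash Table/3365. Rearrange K Substrings to Form Target String.py | isPossibleToRearrange
-- ===== SOURCE A (Python) =====
-- def isPossibleToRearrange(s: str, t: str, k: int) -> bool:
--     dic_s, dic_t = {}, {}
--
--     for i in range(k):
--         temp1 = s[i * (len(s) // k): (i + 1) * (len(s) // k)]
--         temp2 = t[i * (len(t) // k): (i + 1) * (len(t) // k)]
--
--         dic_s[temp1] = dic_s.get(temp1, 0) + 1
--         dic_t[temp2] = dic_t.get(temp2, 0) + 1
--
--     return dic_s == dic_t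
-- ===== SOURCE B (Python) =====
-- def isPossibleToRearrange(s: str, t: str, k: int) -> bool:
--     chunks_s = [s[i * (len(s) // k): (i + 1) * (len(s) // k)] for i in range(k)]
--     chunks_t = [t[i * (len(t) // k): (i + 1) * (len(t) // k)] for i in range(k)]
--     return sorted(chunks_s) == sorted(chunks_t)
-- ===== Notes on version B (the rewrite author's own statement) =====
-- stated objective: simpler
-- what changed: B builds the two lists of k chunks and compares them after sorting (multiset equality by sorting), instead of A's building two frequency dictionaries and comparing them as maps.
import Mathlib
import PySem

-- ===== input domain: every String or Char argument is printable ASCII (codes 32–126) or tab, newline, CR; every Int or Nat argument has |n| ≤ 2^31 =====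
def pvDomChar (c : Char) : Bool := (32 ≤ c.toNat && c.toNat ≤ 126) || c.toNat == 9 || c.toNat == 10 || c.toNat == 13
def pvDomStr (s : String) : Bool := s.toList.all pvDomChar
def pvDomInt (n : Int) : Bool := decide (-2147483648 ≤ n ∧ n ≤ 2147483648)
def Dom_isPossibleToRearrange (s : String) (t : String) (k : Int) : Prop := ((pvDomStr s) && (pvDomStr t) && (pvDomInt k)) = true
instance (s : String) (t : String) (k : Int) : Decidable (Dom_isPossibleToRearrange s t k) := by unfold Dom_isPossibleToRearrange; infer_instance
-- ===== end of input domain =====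

-- B replaces A's frequency-dictionary comparison by sorting the two chunk lists and comparing them (simpler multiset-equality strategy); return values proved equal on the whole domain.
-- ===== PORT A =====
-- port of Python's dict == (order-insensitive map equality): same size and every item of d found in e
def pyDictEq (d e : PySem.Dict String Int) : Bool :=
  d.size == e.size && d.items.all (fun kv => e.get? kv.1 == some kv.2)

def isPossibleToRearrange (s : String) (t : String) (k : Int) : Bool :=
  let p := (PySem.List.pyRange 0 k 1).foldl
    (fun (st : PySem.Dict String Int × PySem.Dict String Int) i =>
      let temp1 := PySem.Str.slice s (some (i * (PySem.Int.floordiv (PySem.Str.len s) k)))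
                                     (some ((i + 1) * (PySem.Int.floordiv (PySem.Str.len s) k)))
      let temp2 := PySem.Str.slice t (some (i * (PySem.Int.floordiv (PySem.Str.len t) k)))
                                     (some ((i + 1) * (PySem.Int.floordiv (PySem.Str.len t) k)))
      (st.1.insert temp1 (st.1.getD temp1 0 + 1), st.2.insert temp2 (st.2.getD temp2 0 + 1)))
    (PySem.Dict.empty, PySem.Dict.empty)
  pyDictEq p.1 p.2

-- ===== PORT B =====
-- the list [x[i*(len(x)//k) : (i+1)*(len(x)//k)] for i in range(k)]
def chunksOf (x : String) (k : Int) : List String :=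
  (PySem.List.pyRange 0 k 1).map (fun i =>
    PySem.Str.slice x (some (i * (PySem.Int.floordiv (PySem.Str.len x) k)))
                      (some ((i + 1) * (PySem.Int.floordiv (PySem.Str.len x) k))))

def isPossibleToRearrange_alt (s : String) (t : String) (k : Int) : Bool :=
  PySem.List.sorted (chunksOf s k) (fun x => x) == PySem.List.sorted (chunksOf t k) (fun x => x)

-- ===== PRECONDITION & SPEC =====
def Spec_isPossibleToRearrange (s : String) (t : String) (k : Int) (out : Bool) : Prop := out = isPossibleToRearrange_alt s t k
instance (s : String) (t : String) (k : Int) (out : Bool) : Decidable (Spec_isPossibleToRearrange s t k out) := by unfold Spec_isPossibleToRearrange; infer_instance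

-- ===== CLAIM (what is proved, stated in full; the proofs are below) =====
def Claim_equal_isPossibleToRearrange : Prop := ∀ (s : String) (t : String) (k : Int), Dom_isPossibleToRearrange s t k → Spec_isPossibleToRearrange s t k (isPossibleToRearrange s t k)

-- ===== LEMMAS AND PROOFS =====

theorem pyDictEq_counter_iff (xs ys : List String) :
    pyDictEq (PySem.Dict.counter xs) (PySem.Dict.counter ys) = true ↔ xs.Perm ys := by
  unfold pyDictEq
  simp only [Bool.and_eq_true, beq_iff_eq, List.all_eq_true, PySem.Dict.items_counter,
    List.mem_map]
  constructor
  · rintro ⟨hsize, hall⟩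
    have hsub : ∀ a ∈ xs, a ∈ ys ∧ xs.count a = ys.count a := by
      intro a ha
      have hmem : a ∈ PySem.Set.ofList xs := (PySem.Set.mem_ofList xs a).mpr ha
      have h := hall (a, (xs.count a : Int)) ⟨a, hmem, rfl⟩
      have hcont : (PySem.Dict.counter ys).contains a = true := by
        rw [PySem.Dict.contains_eq_isSome_get?, h]; rfl
      have hay : a ∈ ys := by
        have := PySem.Dict.contains_counter ys a
        rw [hcont] at this
        exact List.mem_of_elem_eq_true this.symm
      have hgd : (PySem.Dict.counter ys).getD a 0 = (ys.count a : Int) :=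
        PySem.Dict.getD_counter ys a
      have hgd' : (PySem.Dict.counter ys).getD a 0 = (xs.count a : Int) := by
        show ((PySem.Dict.counter ys).get? a).getD 0 = _
        rw [h]; rfl
      refine ⟨hay, ?_⟩
      have : (ys.count a : Int) = (xs.count a : Int) := by rw [← hgd, hgd']
      exact_mod_cast this.symm
    -- key sets: ofList xs ⊆ ofList ys, both nodup, equal length ⇒ same membership
    have hlen : (PySem.Set.ofList xs).length = (PySem.Set.ofList ys).length := by
      have h1 : (PySem.Dict.counter xs).size = (PySem.Set.ofList xs).length := by
        show (PySem.Dict.counter xs).items.length = _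
        rw [PySem.Dict.items_counter]; simp
      have h2 : (PySem.Dict.counter ys).size = (PySem.Set.ofList ys).length := by
        show (PySem.Dict.counter ys).items.length = _
        rw [PySem.Dict.items_counter]; simp
      rw [← h1, ← h2, hsize]
    have hsubset : PySem.Set.ofList xs ⊆ PySem.Set.ofList ys := by
      intro a ha
      exact (PySem.Set.mem_ofList ys a).mpr
        (hsub a ((PySem.Set.mem_ofList xs a).mp ha)).1
    have hperm : (PySem.Set.ofList xs).Perm (PySem.Set.ofList ys) := by
      exact (List.subperm_of_subset (PySem.Set.nodup_ofList xs)
        hsubset).perm_of_length_le (le_of_eq hlen.symm)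
    rw [List.perm_iff_count]
    intro a
    by_cases hax : a ∈ xs
    · exact (hsub a hax).2
    · have hay : a ∉ ys := by
        intro hay
        exact hax ((PySem.Set.mem_ofList xs a).mp
          (hperm.mem_iff.mpr ((PySem.Set.mem_ofList ys a).mpr hay)))
      rw [List.count_eq_zero_of_not_mem hax, List.count_eq_zero_of_not_mem hay]
  · intro hperm
    have hcount := List.perm_iff_count.mp hperm
    have hmemiff : ∀ a, a ∈ PySem.Set.ofList xs ↔ a ∈ PySem.Set.ofList ys := by
      intro a
      rw [PySem.Set.mem_ofList, PySem.Set.mem_ofList, hperm.mem_iff]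
    have hsperm : (PySem.Set.ofList xs).Perm (PySem.Set.ofList ys) :=
      (List.perm_ext_iff_of_nodup (PySem.Set.nodup_ofList xs)
        (PySem.Set.nodup_ofList ys)).mpr hmemiff
    constructor
    · rw [show (PySem.Dict.counter xs).size = (PySem.Dict.counter xs).items.length from rfl,
          show (PySem.Dict.counter ys).size = (PySem.Dict.counter ys).items.length from rfl,
          PySem.Dict.items_counter, PySem.Dict.items_counter]
      simpa using hsperm.length_eq
    rintro kv ⟨b, hb, rfl⟩
    have hbx : b ∈ xs := (PySem.Set.mem_ofList xs b).mp hb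
    have hby : b ∈ ys := hperm.mem_iff.mp hbx
    have hcont : (PySem.Dict.counter ys).contains b = true := by
      rw [PySem.Dict.contains_counter]
      exact List.elem_eq_true_of_mem hby
    rw [PySem.Dict.contains_eq_isSome_get?] at hcont
    obtain ⟨w, hw⟩ := Option.isSome_iff_exists.mp hcont
    have hgd : (PySem.Dict.counter ys).getD b 0 = (ys.count b : Int) :=
      PySem.Dict.getD_counter ys b
    have hw' : w = (ys.count b : Int) := by
      have : ((PySem.Dict.counter ys).get? b).getD 0 = (ys.count b : Int) := hgd
      rw [hw] at this; exact this
    rw [hw, hw', ← hcount b]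

theorem sorted_beq_iff (xs ys : List String) :
    (PySem.List.sorted xs (fun x => x) == PySem.List.sorted ys (fun x => x)) = true ↔ xs.Perm ys := by
  rw [beq_iff_eq]
  exact PySem.List.sorted_id_eq_sorted_id_iff_perm xs ys

-- loop step of A's port, named for the proof below
def insStep (x : String) (k : Int) (d : PySem.Dict String Int) (i : Int) : PySem.Dict String Int :=
  let c := PySem.Str.slice x (some (i * (PySem.Int.floordiv (PySem.Str.len x) k)))
                             (some ((i + 1) * (PySem.Int.floordiv (PySem.Str.len x) k)))
  d.insert c (d.getD c 0 + 1)

theorem portA_eq_counters (s t : String) (k : Int) :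
    isPossibleToRearrange s t k
      = pyDictEq (PySem.Dict.counter (chunksOf s k)) (PySem.Dict.counter (chunksOf t k)) := by
  show pyDictEq
      (((PySem.List.pyRange 0 k 1).foldl
        (fun (st : PySem.Dict String Int × PySem.Dict String Int) i =>
          (insStep s k st.1 i, insStep t k st.2 i))
        (PySem.Dict.empty, PySem.Dict.empty)).1)
      (((PySem.List.pyRange 0 k 1).foldl
        (fun (st : PySem.Dict String Int × PySem.Dict String Int) i =>
          (insStep s k st.1 i, insStep t k st.2 i))
        (PySem.Dict.empty, PySem.Dict.empty)).2) = _
  rw [PySem.List.foldl_prod_mk (insStep s k) (insStep t k)]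
  unfold chunksOf
  rw [← PySem.Dict.foldl_insert_getD_add_one_eq_counter,
      ← PySem.Dict.foldl_insert_getD_add_one_eq_counter,
      List.foldl_map, List.foldl_map]
  rfl

-- ===== VERDICT (by name: the statement is the Claim_ definition above) =====
theorem isPossibleToRearrange_spec : Claim_equal_isPossibleToRearrange := by
  intro s t k _
  unfold Spec_isPossibleToRearrange isPossibleToRearrange_alt
  rw [portA_eq_counters]
  rcases h : (PySem.List.sorted (chunksOf s k) (fun x => x) == PySem.List.sorted (chunksOf t k) (fun x => x)) with _ | _
  · rw [Bool.eq_false_iff]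
    intro hc
    have hp := (pyDictEq_counter_iff _ _).mp hc
    have hb := (sorted_beq_iff _ _).mpr hp
    rw [h] at hb; exact Bool.false_ne_true hb
  · exact (pyDictEq_counter_iff _ _).mpr ((sorted_beq_iff _ _).mp h)
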